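-- pv_equiv track=rewrite | github.com/ZhiqiLi-CG/Hand-Mask-Generation | VideoGenerate.py | get_image_location
-- ===== SOURCE A (Python) =====
-- display_size=[(1,1),(1,2),(1,3),(2,3),(2,3),(2,3),(3,3),(3,3),(3,3)]
--
-- targetLocation=[(0,0),(0,0),(0,1),(0,1),(0,1),(0,1),(1,1),(1,1),(1,1)]
--
-- def get_image_location(validate_number,validate_cur):
--     cur=0
--     for i in range(display_size[validate_number][0]):
--         for j in range(display_size[validate_number][1]):
--             if not (i,j)==targetLocation[validate_number]:
--                 if cur==validate_cur:
--                     return (i,j)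
--                 cur+=1
-- ===== SOURCE B (Python) =====
-- display_size=[(1,1),(1,2),(1,3),(2,3),(2,3),(2,3),(3,3),(3,3),(3,3)]
--
-- targetLocation=[(0,0),(0,0),(0,1),(0,1),(0,1),(0,1),(1,1),(1,1),(1,1)]
--
-- def get_image_location(validate_number, validate_cur):
--     rows, cols = display_size[validate_number]
--     tr, tc = targetLocation[validate_number]
--     t = tr * cols + tc
--     pos = validate_cur if validate_cur < t else validate_cur + 1
--     if validate_cur < 0 or pos >= rows * cols:
--         return None
--     return divmod(pos, cols)
-- ===== Notes on version B (the rewrite author's own statement) =====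
-- stated objective: simpler
-- what changed: A scans the grid cell by cell with nested loops and a running counter; B computes the answer in closed form: shift the index past the target cell (pos = vc if vc < target_linear_index else vc+1), guard the out-of-range cases, and return divmod(pos, cols).
import Mathlib
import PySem

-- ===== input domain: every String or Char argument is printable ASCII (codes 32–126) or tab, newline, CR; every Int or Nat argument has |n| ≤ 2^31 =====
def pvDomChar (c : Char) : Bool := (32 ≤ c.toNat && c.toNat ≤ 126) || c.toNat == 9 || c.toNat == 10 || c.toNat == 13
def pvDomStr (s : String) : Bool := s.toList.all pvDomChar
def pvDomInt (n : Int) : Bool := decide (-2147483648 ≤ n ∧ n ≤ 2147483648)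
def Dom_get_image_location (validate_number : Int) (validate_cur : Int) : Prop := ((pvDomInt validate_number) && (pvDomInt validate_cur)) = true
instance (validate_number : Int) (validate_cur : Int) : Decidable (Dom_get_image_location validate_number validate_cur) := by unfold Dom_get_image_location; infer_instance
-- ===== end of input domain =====

-- B replaces A's nested scan over the grid cells by a closed-form index shift plus divmod (objective: simpler).

-- ===== PORT A =====
def dsTable : List (Int × Int) := [(1,1),(1,2),(1,3),(2,3),(2,3),(2,3),(3,3),(3,3),(3,3)]
def tgtTable : List (Int × Int) := [(0,0),(0,0),(0,1),(0,1),(0,1),(0,1),(1,1),(1,1),(1,1)]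

-- inner 'for j in range(cols)' loop: (early return if any, updated cur)
def loopJ (i : Int) (js : List Int) (tgt : Int × Int) (vc cur : Int) : Option (Int × Int) × Int :=
  match js with
  | [] => (none, cur)
  | j :: rest =>
      if (i, j) = tgt then loopJ i rest tgt vc cur
      else if cur = vc then (some (i, j), cur)
      else loopJ i rest tgt vc (cur + 1)

-- outer 'for i in range(rows)' loop
def loopI (is_ : List Int) (c : Int) (tgt : Int × Int) (vc cur : Int) : Option (Int × Int) :=
  match is_ with
  | [] => none
  | i :: rest =>
      match loopJ i (PySem.List.pyRange 0 c 1) tgt vc cur with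
      | (some res, _) => some res
      | (none, cur') => loopI rest c tgt vc cur'

def get_image_location (validate_number : Int) (validate_cur : Int) : Option (Int × Int) :=
  match PySem.List.pyGet? dsTable validate_number, PySem.List.pyGet? tgtTable validate_number with
  | some (r, c), some tgt => loopI (PySem.List.pyRange 0 r 1) c tgt validate_cur 0
  | _, _ => none   -- Python raises IndexError here; excluded by Pre_

-- ===== PORT B =====
def dsTableB : List (Int × Int) := [(1,1),(1,2),(1,3),(2,3),(2,3),(2,3),(3,3),(3,3),(3,3)]
def tgtTableB : List (Int × Int) := [(0,0),(0,0),(0,1),(0,1),(0,1),(0,1),(1,1),(1,1),(1,1)]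
def get_image_location_alt (validate_number : Int) (validate_cur : Int) : Option (Int × Int) :=
  match PySem.List.pyGet? dsTableB validate_number with
  | none => none   -- Python raises IndexError here; excluded by Pre_
  | some (rows, cols) =>
    match PySem.List.pyGet? tgtTableB validate_number with
    | none => none   -- Python raises IndexError here; excluded by Pre_
    | some (tr, tc) =>
        let t := tr * cols + tc
        let pos := if validate_cur < t then validate_cur else validate_cur + 1
        if validate_cur < 0 ∨ pos ≥ rows * cols then none
        else some (PySem.Int.floordiv pos cols, PySem.Int.mod pos cols)

-- ===== PRECONDITION & SPEC =====
-- Pre_ excludes exactly the indices where Python's display_size[validate_number] raises IndexError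
-- (the tables have length 9; negative indices down to -9 wrap in Python and are admitted).
def Pre_get_image_location (validate_number : Int) (validate_cur : Int) : Prop :=
  -9 ≤ validate_number ∧ validate_number < 9
instance (validate_number : Int) (validate_cur : Int) : Decidable (Pre_get_image_location validate_number validate_cur) := by unfold Pre_get_image_location; infer_instance

def pvWitness_get_image_location : Int × Int := (4, 2)

def Spec_get_image_location (validate_number : Int) (validate_cur : Int) (out : Option (Int × Int)) : Prop := out = get_image_location_alt validate_number validate_cur
instance (validate_number : Int) (validate_cur : Int) (out : Option (Int × Int)) : Decidable (Spec_get_image_location validate_number validate_cur out) := by unfold Spec_get_image_location; infer_instance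

-- ===== CLAIM (what is proved, stated in full; the proofs are below) =====
def Claim_equal_get_image_location : Prop := ∀ (validate_number : Int) (validate_cur : Int), Dom_get_image_location validate_number validate_cur → Pre_get_image_location validate_number validate_cur → Spec_get_image_location validate_number validate_cur (get_image_location validate_number validate_cur)

-- ===== LEMMAS AND PROOFS =====

-- if vc is already below the running counter, the inner loop never fires and only increments cur
theorem loopJ_neg (i : Int) (js : List Int) (tgt : Int × Int) (vc cur : Int) (h : vc < cur) :
    (loopJ i js tgt vc cur).1 = none ∧ vc < (loopJ i js tgt vc cur).2 := by
  induction js generalizing cur with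
  | nil => exact ⟨rfl, h⟩
  | cons j rest ih =>
    simp only [loopJ]
    split_ifs with h1 h2
    · exact ih cur h
    · exact absurd h2 (by omega)
    · exact ih (cur + 1) (by omega)

-- if vc is beyond everything the inner loop can count to, it never fires
theorem loopJ_big (i : Int) (js : List Int) (tgt : Int × Int) (vc cur : Int)
    (h : cur + js.length ≤ vc) :
    (loopJ i js tgt vc cur).1 = none ∧ (loopJ i js tgt vc cur).2 ≤ cur + js.length := by
  induction js generalizing cur with
  | nil => exact ⟨rfl, by simp [loopJ]⟩
  | cons j rest ih =>
    simp only [loopJ, List.length_cons] at *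
    split_ifs with h1 h2
    · obtain ⟨ha, hb⟩ := ih cur (by omega)
      exact ⟨ha, by omega⟩
    · exact absurd h2 (by omega)
    · obtain ⟨ha, hb⟩ := ih (cur + 1) (by omega)
      exact ⟨ha, by omega⟩

theorem loopI_neg (is_ : List Int) (c : Int) (tgt : Int × Int) (vc cur : Int) (h : vc < cur) :
    loopI is_ c tgt vc cur = none := by
  induction is_ generalizing cur with
  | nil => rfl
  | cons i rest ih =>
    have hJ := loopJ_neg i (PySem.List.pyRange 0 c 1) tgt vc cur h
    simp only [loopI]
    rcases hP : loopJ i (PySem.List.pyRange 0 c 1) tgt vc cur with ⟨o, cur'⟩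
    rw [hP] at hJ
    cases o with
    | none => exact ih cur' hJ.2
    | some res => exact absurd hJ.1 (by simp)

theorem loopI_big (is_ : List Int) (c : Int) (tgt : Int × Int) (vc cur : Int)
    (h : cur + is_.length * (PySem.List.pyRange 0 c 1).length ≤ vc) :
    loopI is_ c tgt vc cur = none := by
  induction is_ generalizing cur with
  | nil => rfl
  | cons i rest ih =>
    have hJ := loopJ_big i (PySem.List.pyRange 0 c 1) tgt vc cur
      (by
        simp only [List.length_cons] at h
        push_cast at h ⊢
        nlinarith [Int.natCast_nonneg rest.length, Int.natCast_nonneg (PySem.List.pyRange 0 c 1).length])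
    simp only [loopI]
    rcases hP : loopJ i (PySem.List.pyRange 0 c 1) tgt vc cur with ⟨o, cur'⟩
    rw [hP] at hJ
    cases o with
    | none =>
      refine ih cur' ?_
      simp only [List.length_cons] at h
      have := hJ.2
      push_cast at h ⊢
      nlinarith
    | some res => exact absurd hJ.1 (by simp)

theorem portA_none (vn vc : Int) (h : vc < 0 ∨ 9 ≤ vc) : get_image_location vn vc = none := by
  unfold get_image_location
  cases h1 : PySem.List.pyGet? dsTable vn with
  | none => cases h2 : PySem.List.pyGet? tgtTable vn <;> rfl
  | some rc =>
    obtain ⟨r, c⟩ := rc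
    cases h2 : PySem.List.pyGet? tgtTable vn with
    | none => rfl
    | some tgt =>
      rcases h with hneg | hbig
      · exact loopI_neg _ _ _ _ _ hneg
      · refine loopI_big _ _ _ _ _ ?_
        have hmem := PySem.List.mem_of_pyGet?_eq_some dsTable h1
        fin_cases hmem <;> simp [PySem.List.length_pyRange_one] <;> omega

theorem portB_none (vn vc : Int) (h : vc < 0 ∨ 9 ≤ vc) : get_image_location_alt vn vc = none := by
  unfold get_image_location_alt
  cases h1 : PySem.List.pyGet? dsTableB vn with
  | none => rfl
  | some rc =>
    obtain ⟨r, c⟩ := rc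
    cases h2 : PySem.List.pyGet? tgtTableB vn with
    | none => rfl
    | some tgt =>
      obtain ⟨tr, tc⟩ := tgt
      have hmem := PySem.List.mem_of_pyGet?_eq_some dsTableB h1
      fin_cases hmem <;> (dsimp only; split_ifs <;> first | rfl | omega)

-- ===== VERDICT (by name: the statement is the Claim_ definition above) =====
theorem get_image_location_spec : Claim_equal_get_image_location := by
  unfold Claim_equal_get_image_location Spec_get_image_location Pre_get_image_location
  intro vn vc _ hp
  obtain ⟨hp1, hp2⟩ := hp
  by_cases hmid : 0 ≤ vc ∧ vc < 9
  · obtain ⟨hm1, hm2⟩ := hmid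
    interval_cases vn <;> interval_cases vc <;> decide
  · have hvc : vc < 0 ∨ 9 ≤ vc := by omega
    rw [portA_none vn vc hvc, portB_none vn vc hvc]
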